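-- pv_equiv track=rewrite | github.com/romarroca/domaintracker | create_domainlist.py | generate_homographs
-- ===== SOURCE A (Python) =====
-- def generate_homographs(word):
--     homograph_map = {
--         'e': ['е'],
--         't': ['т'],
--         's': ['ѕ']
--     }
--     generated_words = [word]
--
--     for char, replacements in homograph_map.items():
--         new_words = []
--         for generated in generated_words:
--             if char in generated:
--                 for replacement in replacements:
--                     new_words.append(generated.replace(char, replacement))
--         generated_words.extend(new_words)
--
--     return generated_words
-- ===== SOURCE B (Python) =====
-- def generate_homographs(word):
--     specs = [('e', '\u0435'), ('t', '\u0442'), ('s', '\u0455')]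
--     present = [(c, r) for c, r in specs if c in word]
--     results = []
--     for mask in range(2 ** len(present)):
--         w = word
--         m = mask
--         for c, r in present:
--             if m % 2 == 1:
--                 w = w.replace(c, r)
--             m //= 2
--         results.append(w)
--     return results
-- ===== Notes on version B (the rewrite author's own statement) =====
-- stated objective: alternative
-- what changed: Instead of repeatedly doubling a growing list (scanning every already-generated word per character), B enumerates the 2^k subset masks of the homograph characters actually present in the word and applies each selected replacement set directly to the original word, producing the same list in the same (binary-counting, 'e' least significant) order.
import Mathlib
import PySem

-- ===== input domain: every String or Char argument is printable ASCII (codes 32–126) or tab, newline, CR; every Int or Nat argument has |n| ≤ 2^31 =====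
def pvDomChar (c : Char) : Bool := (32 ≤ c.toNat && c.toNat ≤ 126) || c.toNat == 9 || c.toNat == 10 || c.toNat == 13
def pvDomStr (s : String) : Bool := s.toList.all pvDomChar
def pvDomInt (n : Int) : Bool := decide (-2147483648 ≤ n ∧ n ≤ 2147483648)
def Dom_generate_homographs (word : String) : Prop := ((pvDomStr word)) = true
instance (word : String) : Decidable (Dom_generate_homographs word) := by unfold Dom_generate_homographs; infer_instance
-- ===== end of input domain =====

-- B replaces A's list-doubling passes by a direct enumeration of the 2^k replacement
-- subset masks of the characters present in the word (alternative structure, same cost).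
-- ===== PORT A =====
-- homograph_map.items() iterates in insertion order: ("e",…), ("t",…), ("s",…)
def generate_homographs (word : String) : List String :=
  let homograph_map : PySem.Dict String (List String) :=
    (((PySem.Dict.empty : PySem.Dict String (List String)).insert "e" ["е"]).insert "t" ["т"]).insert "s" ["ѕ"]
  homograph_map.items.foldl (fun generated_words cr =>
    let new_words := generated_words.foldl (fun new_words generated =>
      if PySem.Str.isIn cr.1 generated then
        cr.2.foldl (fun nw replacement => nw ++ [PySem.Str.replace generated cr.1 replacement]) new_words
      else new_words) ([] : List String)
    generated_words ++ new_words) [word]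

-- ===== PORT B =====
-- B: enumerate all 2^k subset masks of the characters actually present and apply
-- the selected replacements to the original word ('e' is the least-significant bit).
def generate_homographs_alt (word : String) : List String :=
  let specs : List (String × String) := [("e", "е"), ("t", "т"), ("s", "ѕ")]
  let present := specs.filter (fun p => PySem.Str.isIn p.1 word)
  (PySem.List.pyRange 0 ((2 : Int) ^ present.length) 1).foldl (fun results mask =>
    let wm := present.foldl (fun (wm : String × Int) p =>
      ((if PySem.Int.mod wm.2 2 == 1 then PySem.Str.replace wm.1 p.1 p.2 else wm.1),
       PySem.Int.floordiv wm.2 2)) (word, mask)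
    results ++ [wm.1]) []

-- ===== PRECONDITION & SPEC =====
def Spec_generate_homographs (word : String) (out : List String) : Prop := out = generate_homographs_alt word
instance (word : String) (out : List String) : Decidable (Spec_generate_homographs word out) := by unfold Spec_generate_homographs; infer_instance

-- ===== CLAIM (what is proved, stated in full; the proofs are below) =====
def Claim_equal_generate_homographs : Prop := ∀ (word : String), Dom_generate_homographs word → Spec_generate_homographs word (generate_homographs word)

-- ===== LEMMAS AND PROOFS =====

-- replace.go with a single-char pattern maps every occurrence of c to r
lemma replace_go_single (c r : Char) : ∀ (l : List Char) (fuel : Nat) (acc : List Char),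
    l.length ≤ fuel →
    PySem.Chars.replace.go [c] [r] fuel l acc
      = acc.reverse ++ l.map (fun x => if x = c then r else x) := by
  intro l
  induction l with
  | nil =>
    intro fuel acc _
    cases fuel <;> simp [PySem.Chars.replace.go]
  | cons x t ih =>
    intro fuel acc hle
    cases fuel with
    | zero => simp at hle
    | succ f =>
      by_cases hx : c = x
      · subst hx
        rw [PySem.Chars.replace.go]
        have hpre : ([c].isPrefixOf (c :: t)) = true := by simp [List.isPrefixOf]
        simp only [hpre, if_true, List.length_nil, List.length_cons, Nat.zero_add,
          List.drop_succ_cons, List.drop_zero]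
        rw [ih f ([r].reverse ++ acc) (by simp at hle; omega)]
        simp
      · rw [PySem.Chars.replace.go]
        have hbeq : ([c].isPrefixOf (x :: t)) = false := by
          simp [List.isPrefixOf, hx]
        rw [hbeq]
        simp only [Bool.false_eq_true, if_false]
        rw [ih f (x :: acc) (by simp at hle ⊢; omega)]
        simp [Ne.symm hx]

-- Python's s.replace(c, r) for a one-char pattern is a map over the characters
lemma replace_single (s : List Char) (c r : Char) :
    PySem.Chars.replace s [c] [r] = s.map (fun x => if x = c then r else x) := by
  rw [PySem.Chars.replace]
  simp [replace_go_single c r s s.length [] le_rfl]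

-- membership of a single char as a Bool
lemma isIn_single (d : Char) (s : List Char) :
    PySem.Chars.isIn [d] s = decide (d ∈ s) := by
  rw [Bool.eq_iff_iff]
  simp [PySem.Chars.isIn_iff_infix, List.singleton_infix_iff]

-- replacing c by r does not affect membership of a third char d
lemma isIn_replace_single (w : List Char) (d c r : Char) (hdc : d ≠ c) (hdr : d ≠ r) :
    PySem.Chars.isIn [d] (PySem.Chars.replace w [c] [r]) = PySem.Chars.isIn [d] w := by
  rw [replace_single, isIn_single, isIn_single]
  congr 1
  rw [eq_iff_iff]
  constructor
  · intro h
    rcases List.mem_map.mp h with ⟨x, hx, hfx⟩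
    by_cases hxc : x = c
    · simp [hxc] at hfx; exact absurd hfx.symm hdr
    · simp [hxc] at hfx; simpa [hfx] using hx
  · intro h
    exact List.mem_map.mpr ⟨d, h, by simp [hdc]⟩

-- the three instances used by the case analysis, in the simp-normal form of the goal
lemma isIn_t_e (w : List Char) :
    PySem.Chars.isIn ['t'] (PySem.Chars.replace w ['e'] ['е']) = PySem.Chars.isIn ['t'] w :=
  isIn_replace_single w 't' 'e' 'е' (by decide) (by decide)

lemma isIn_s_e (w : List Char) :
    PySem.Chars.isIn ['s'] (PySem.Chars.replace w ['e'] ['е']) = PySem.Chars.isIn ['s'] w :=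
  isIn_replace_single w 's' 'e' 'е' (by decide) (by decide)

lemma isIn_s_t (w : List Char) :
    PySem.Chars.isIn ['s'] (PySem.Chars.replace w ['t'] ['т']) = PySem.Chars.isIn ['s'] w :=
  isIn_replace_single w 's' 't' 'т' (by decide) (by decide)

-- ===== VERDICT (by name: the statement is the Claim_ definition above) =====
theorem generate_homographs_spec : Claim_equal_generate_homographs := by
  intro word _
  unfold Spec_generate_homographs generate_homographs generate_homographs_alt
  have hitems : ((((PySem.Dict.empty : PySem.Dict String (List String)).insert "e" ["е"]).insert "t" ["т"]).insert "s" ["ѕ"]).items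
      = [("e", ["е"]), ("t", ["т"]), ("s", ["ѕ"])] := by decide
  have h1 : PySem.List.pyRange 0 (1 : Int) 1 = [0] := by decide
  have h2 : PySem.List.pyRange 0 (2 : Int) 1 = [0, 1] := by decide
  have h4 : PySem.List.pyRange 0 (4 : Int) 1 = [0, 1, 2, 3] := by decide
  have h8 : PySem.List.pyRange 0 (8 : Int) 1 = [0, 1, 2, 3, 4, 5, 6, 7] := by decide
  by_cases hE : PySem.Chars.isIn ['e'] word.toList = true <;>
    by_cases hT : PySem.Chars.isIn ['t'] word.toList = true <;>
      by_cases hS : PySem.Chars.isIn ['s'] word.toList = true <;>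
        simp [hitems, hE, hT, hS, isIn_t_e, isIn_s_e, isIn_s_t, h1, h2, h4, h8,
          PySem.Int.mod, PySem.Int.floordiv]
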